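-- pv_equiv track=rewrite | github.com/alicja832/python | l9/module.py | spr_year
-- ===== SOURCE A (Python) =====
-- def spr_year(year):
--     s={
--         1800:80,
--         1900:0,
--         2000:20,
--         2100:40,
--         2200:60
--     }
--     for i in s:
--         if year>=i and year<(i+100):
--             return s[i]
-- ===== SOURCE B (Python) =====
-- def spr_year(year):
--     if 1800 <= year < 2300:
--         return (year // 100 - 19) * 20 % 100
--     return None
-- ===== Notes on version B (the rewrite author's own statement) =====
-- stated objective: simpler
-- what changed: Replaces the dict scan with a single range guard and a closed-form arithmetic expression on the century index.
import Mathlib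
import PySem

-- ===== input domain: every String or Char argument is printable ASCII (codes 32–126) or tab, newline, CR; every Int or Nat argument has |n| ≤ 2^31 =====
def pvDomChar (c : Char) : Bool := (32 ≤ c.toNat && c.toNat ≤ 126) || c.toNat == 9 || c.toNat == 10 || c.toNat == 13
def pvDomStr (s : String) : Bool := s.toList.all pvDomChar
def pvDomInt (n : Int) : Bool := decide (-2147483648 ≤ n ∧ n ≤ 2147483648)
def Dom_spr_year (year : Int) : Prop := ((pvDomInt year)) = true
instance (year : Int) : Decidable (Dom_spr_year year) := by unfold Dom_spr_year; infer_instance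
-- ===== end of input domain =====

-- B replaces A's five-entry dict scan with a single range guard and the closed form (year//100 - 19)*20 % 100 (simpler).


-- ===== PORT A =====
-- 'for i in s: if year>=i and year<(i+100): return s[i]' — recursion over the dict's keys
def spr_year_go (year : Int) (s : PySem.Dict Int Int) : List Int → Option Int
  | [] => none
  | i :: rest =>
      if year ≥ i ∧ year < i + 100 then PySem.Dict.get? s i
      else spr_year_go year s rest

def spr_year (year : Int) : Option Int :=
  let s : PySem.Dict Int Int :=
    PySem.Dict.ofList [(1800, 80), (1900, 0), (2000, 20), (2100, 40), (2200, 60)]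
  spr_year_go year s s.keys

-- ===== PORT B =====
def spr_year_alt (year : Int) : Option Int :=
  if 1800 ≤ year ∧ year < 2300 then
    some (PySem.Int.mod ((PySem.Int.floordiv year 100 - 19) * 20) 100)
  else none

-- ===== PRECONDITION & SPEC =====
def Spec_spr_year (year : Int) (out : Option Int) : Prop := out = spr_year_alt year
instance (year : Int) (out : Option Int) : Decidable (Spec_spr_year year out) := by unfold Spec_spr_year; infer_instance

-- ===== CLAIM (what is proved, stated in full; the proofs are below) =====
def Claim_equal_spr_year : Prop := ∀ (year : Int), Dom_spr_year year → Spec_spr_year year (spr_year year)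

-- ===== LEMMAS AND PROOFS =====

theorem spr_year_alt_case (year c v : Int) (h : 1800 ≤ year ∧ year < 2300)
    (hf : PySem.Int.floordiv year 100 = c)
    (hv : PySem.Int.mod ((c - 19) * 20) 100 = v) :
    spr_year_alt year = some v := by
  unfold spr_year_alt
  rw [if_pos h, hf, hv]

-- ===== VERDICT (by name: the statement is the Claim_ definition above) =====
theorem spr_year_spec : Claim_equal_spr_year := by
  intro year _
  unfold Spec_spr_year
  by_cases h18 : 1800 ≤ year ∧ year < 1900
  · rw [spr_year_alt_case year 18 80 (by omega)
      ((PySem.Int.floordiv_eq_iff_of_pos (b := 100) (by norm_num)).2 (by omega)) (by decide)]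
    simp only [spr_year]
    norm_num [spr_year_go, PySem.Dict.ofList, PySem.Dict.update, PySem.Dict.insert,
      PySem.Dict.empty, PySem.Dict.contains, PySem.Dict.keys, PySem.Dict.items,
      PySem.Dict.get?, h18.1, h18.2]
  by_cases h19 : 1900 ≤ year ∧ year < 2000
  · rw [spr_year_alt_case year 19 0 (by omega)
      ((PySem.Int.floordiv_eq_iff_of_pos (b := 100) (by norm_num)).2 (by omega)) (by decide)]
    simp only [spr_year]
    norm_num [spr_year_go, PySem.Dict.ofList, PySem.Dict.update, PySem.Dict.insert,
      PySem.Dict.empty, PySem.Dict.contains, PySem.Dict.keys, PySem.Dict.items,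
      PySem.Dict.get?, h19.1, h19.2]
  by_cases h20 : 2000 ≤ year ∧ year < 2100
  · rw [spr_year_alt_case year 20 20 (by omega)
      ((PySem.Int.floordiv_eq_iff_of_pos (b := 100) (by norm_num)).2 (by omega)) (by decide)]
    simp only [spr_year]
    norm_num [spr_year_go, PySem.Dict.ofList, PySem.Dict.update, PySem.Dict.insert,
      PySem.Dict.empty, PySem.Dict.contains, PySem.Dict.keys, PySem.Dict.items,
      PySem.Dict.get?, h20.1, h20.2]
    split_ifs
    rfl
  by_cases h21 : 2100 ≤ year ∧ year < 2200
  · rw [spr_year_alt_case year 21 40 (by omega)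
      ((PySem.Int.floordiv_eq_iff_of_pos (b := 100) (by norm_num)).2 (by omega)) (by decide)]
    simp only [spr_year]
    norm_num [spr_year_go, PySem.Dict.ofList, PySem.Dict.update, PySem.Dict.insert,
      PySem.Dict.empty, PySem.Dict.contains, PySem.Dict.keys, PySem.Dict.items,
      PySem.Dict.get?, h21.1, h21.2]
    split_ifs
    rfl
  by_cases h22 : 2200 ≤ year ∧ year < 2300
  · rw [spr_year_alt_case year 22 60 (by omega)
      ((PySem.Int.floordiv_eq_iff_of_pos (b := 100) (by norm_num)).2 (by omega)) (by decide)]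
    simp only [spr_year]
    norm_num [spr_year_go, PySem.Dict.ofList, PySem.Dict.update, PySem.Dict.insert,
      PySem.Dict.empty, PySem.Dict.contains, PySem.Dict.keys, PySem.Dict.items,
      PySem.Dict.get?, h22.1, h22.2]
    split_ifs
    rfl
  · have hout : ¬ (1800 ≤ year ∧ year < 2300) := by omega
    unfold spr_year_alt
    rw [if_neg hout]
    simp only [spr_year]
    norm_num [spr_year_go, PySem.Dict.ofList, PySem.Dict.update, PySem.Dict.insert,
      PySem.Dict.empty, PySem.Dict.contains, PySem.Dict.keys, PySem.Dict.items,
      PySem.Dict.get?]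
    split_ifs
    rfl
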